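-- pv_equiv track=rewrite | github.com/AlexZamioudis/PtyxiakiAlexandrosZamioudis | code/tools/for training/iob_to_bc2_2.py | find_starts
-- ===== SOURCE A (Python) =====
-- def find_starts(text, entities):
--     index = 0
--     starts = []
--     for i in entities:
--         pos = text.find(i, index)
--         if pos != -1:
--             index = pos + len(i)
--             tmp = text[:pos]
--             wsb = len(tmp) - len(tmp.replace(" ", "")) #white spaces between the words
--             """
--             In the biocreative corpus the starts of the entities are given without
--             counting the whitespaces
--             """
--             starts.append(pos - wsb)
--         else:
--             starts.append(-1)
--
--     return starts
-- ===== SOURCE B (Python) =====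
-- def find_starts(text, entities):
--     # Prefix-sum of non-space character counts: ns[i] = non-spaces in text[:i],
--     # so the adjusted start at pos is just ns[pos] — no per-entity slice/replace pass.
--     ns = [0]
--     run = 0
--     for c in text:
--         run += c != " "
--         ns.append(run)
--     starts = []
--     index = 0
--     for e in entities:
--         pos = text.find(e, index)
--         if pos == -1:
--             starts.append(-1)
--         else:
--             starts.append(ns[pos])
--             index = pos + len(e)
--     return starts
-- ===== Notes on version B (the rewrite author's own statement) =====
-- stated objective: alternative
-- what changed: Replaces the per-entity text[:pos] slice plus .replace(' ','') pass with a single precomputed prefix-sum array of non-space counts, so each found entity's adjusted start is a table lookup; overall cost is dominated by the str.find scans either way.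
import Mathlib
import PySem

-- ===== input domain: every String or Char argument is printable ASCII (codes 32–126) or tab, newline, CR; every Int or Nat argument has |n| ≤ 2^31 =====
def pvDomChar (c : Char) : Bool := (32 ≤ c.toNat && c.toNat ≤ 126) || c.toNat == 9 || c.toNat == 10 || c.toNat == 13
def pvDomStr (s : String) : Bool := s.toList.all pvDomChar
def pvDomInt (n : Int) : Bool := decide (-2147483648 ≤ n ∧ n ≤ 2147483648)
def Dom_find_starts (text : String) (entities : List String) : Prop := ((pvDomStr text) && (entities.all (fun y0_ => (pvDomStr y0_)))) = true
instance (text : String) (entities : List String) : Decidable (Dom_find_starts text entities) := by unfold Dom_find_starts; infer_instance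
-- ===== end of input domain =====

-- B replaces A's per-entity prefix slice + replace(" ","") pass with one precomputed
-- prefix-sum array of non-space counts (objective: alternative algorithm, same cost).

-- ===== PORT A =====
def find_starts (text : String) (entities : List String) : List Int :=
  (entities.foldl (fun (st : Int × List Int) i =>
    let pos := PySem.Str.findFrom text i st.1
    if pos ≠ -1 then
      let tmp := PySem.Str.slice text none (some pos)
      let wsb : Int := (PySem.Str.len tmp : Int) - (PySem.Str.len (PySem.Str.replace tmp " " "") : Int)
      (pos + (PySem.Str.len i : Int), st.2 ++ [pos - wsb])
    else
      (st.1, st.2 ++ [-1])) ((0 : Int), ([] : List Int))).2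

-- ===== PORT B =====
def find_starts_alt (text : String) (entities : List String) : List Int :=
  let ns : List Int :=
    (text.toList.foldl (fun (st : Int × List Int) c =>
      let run := st.1 + (if c = ' ' then 0 else 1)
      (run, st.2 ++ [run])) ((0 : Int), [(0 : Int)])).2
  (entities.foldl (fun (st : Int × List Int) e =>
    let pos := PySem.Str.findFrom text e st.1
    if pos = -1 then
      (st.1, st.2 ++ [-1])
    else
      -- ns[pos]: pos is always in range here, so the default of pyGetD is never used
      (pos + (PySem.Str.len e : Int), st.2 ++ [PySem.List.pyGetD ns pos 0])) ((0 : Int), ([] : List Int))).2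

-- ===== PRECONDITION & SPEC =====
def Spec_find_starts (text : String) (entities : List String) (out : List Int) : Prop := out = find_starts_alt text entities
instance (text : String) (entities : List String) (out : List Int) : Decidable (Spec_find_starts text entities out) := by unfold Spec_find_starts; infer_instance

-- ===== CLAIM (what is proved, stated in full; the proofs are below) =====
def Claim_equal_find_starts : Prop := ∀ (text : String) (entities : List String), Dom_find_starts text entities → Spec_find_starts text entities (find_starts text entities)

-- ===== LEMMAS AND PROOFS =====
theorem pv_replace_go_space (fuel : Nat) (l acc : List Char) (h : l.length ≤ fuel) :
    PySem.Chars.replace.go [' '] [] fuel l acc = acc.reverse ++ l.filter (fun c => c != ' ') := by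
  induction fuel generalizing l acc with
  | zero =>
    have : l = [] := List.eq_nil_of_length_eq_zero (Nat.le_zero.mp h)
    subst this
    simp [PySem.Chars.replace.go]
  | succ n ih =>
    cases l with
    | nil => simp [PySem.Chars.replace.go]
    | cons c t =>
      rw [PySem.Chars.replace.go]
      have ht : t.length ≤ n := Nat.le_of_succ_le_succ (by simpa using h)
      by_cases hc : c = ' '
      · subst hc
        have hp : (List.isPrefixOf [' '] (' ' :: t)) = true := by simp [List.isPrefixOf]
        simp [hp, ih t acc ht]
      · have hp : (List.isPrefixOf [' '] (c :: t)) = false := by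
          simp [List.isPrefixOf]; exact fun h' => hc h'.symm
        simp [hp, ih t (c :: acc) ht, hc]

theorem pv_replace_space (cs : List Char) :
    PySem.Chars.replace cs [' '] [] = cs.filter (fun c => c != ' ') := by
  rw [PySem.Chars.replace]
  simp [pv_replace_go_space cs.length cs [] (le_refl _)]

theorem pv_ns_foldl (cs : List Char) (r : Int) (acc : List Int) :
    cs.foldl (fun (st : Int × List Int) c =>
      let run := st.1 + (if c = ' ' then 0 else 1)
      (run, st.2 ++ [run])) (r, acc)
    = (r + ((cs.countP (fun c => c != ' ') : Nat) : Int),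
       acc ++ (List.range cs.length).map (fun i => r + (((cs.take (i+1)).countP (fun c => c != ' ') : Nat) : Int))) := by
  induction cs generalizing r acc with
  | nil => simp
  | cons c t ih =>
    simp only [List.foldl_cons, ih]
    simp only [Prod.mk.injEq]
    refine ⟨?_, ?_⟩
    · simp [List.countP_cons]
      by_cases hc : c = ' ' <;> simp [hc] <;> push_cast <;> ring
    · rw [List.length_cons, List.range_succ_eq_map, List.map_cons, List.map_map, List.append_assoc,
        List.singleton_append]
      congr 1
      congr 1
      · simp [List.countP_cons]
      · apply List.map_congr_left
        intro i _
        simp only [Function.comp_apply, List.take_succ_cons, List.countP_cons]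
        by_cases hc : c = ' ' <;> simp [hc] <;> push_cast <;> ring

theorem pv_ns_eq (cs : List Char) :
    ((cs.foldl (fun (st : Int × List Int) c =>
      let run := st.1 + (if c = ' ' then 0 else 1)
      (run, st.2 ++ [run])) ((0 : Int), [(0 : Int)])).2)
    = (List.range (cs.length + 1)).map (fun i => (((cs.take i).countP (fun c => c != ' ') : Nat) : Int)) := by
  rw [pv_ns_foldl]
  rw [List.range_succ_eq_map]
  simp [List.map_map, Function.comp]

theorem pv_val_eq (text : String) (pos : Int) (h0 : 0 ≤ pos) (h1 : pos ≤ (text.toList.length : Int)) :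
    pos - ((PySem.Str.len (PySem.Str.slice text none (some pos)) : Int)
         - (PySem.Str.len (PySem.Str.replace (PySem.Str.slice text none (some pos)) " " "") : Int))
    = PySem.List.pyGetD
        ((text.toList.foldl (fun (st : Int × List Int) c =>
          let run := st.1 + (if c = ' ' then 0 else 1)
          (run, st.2 ++ [run])) ((0 : Int), [(0 : Int)])).2) pos 0 := by
  rw [pv_ns_eq]
  obtain ⟨p, rfl⟩ : ∃ p : Nat, pos = (p : Int) := ⟨pos.toNat, by omega⟩
  have hp : p ≤ text.toList.length := by exact_mod_cast h1
  rw [PySem.List.pyGetD_natCast]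
  have hlt : p < ((List.range (text.toList.length + 1)).map (fun i => (((text.toList.take i).countP (fun c => c != ' ') : Nat) : Int))).length := by
    simp only [List.length_map, List.length_range]; omega
  rw [List.getD_eq_getElem _ _ hlt]
  simp only [List.getElem_map, List.getElem_range]
  have htl : (PySem.Str.slice text none (some (p:Int))).toList = text.toList.take p := by
    rw [PySem.Str.toList_slice]
    simp [PySem.List.slice_to_natCast]
  have hrepl : (PySem.Str.replace (PySem.Str.slice text none (some (p:Int))) " " "").toList
      = (text.toList.take p).filter (fun c => c != ' ') := by
    rw [PySem.Str.toList_replace, htl]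
    simpa using pv_replace_space (text.toList.take p)
  rw [PySem.Str.len_eq, PySem.Str.len_eq, htl, hrepl]
  have hlen : (text.toList.take p).length = p := by rw [List.length_take]; omega
  rw [hlen, ← List.countP_eq_length_filter]
  have hc : (List.countP (fun c => c != ' ') (List.take p text.toList)) ≤ p := by
    calc _ ≤ (List.take p text.toList).length := List.countP_le_length
    _ = p := hlen
  omega


theorem pv_findFrom_bounds_chars (s sub : List Char) (st : Int) (h : PySem.Chars.findFrom s sub st ≠ -1) :
    0 ≤ PySem.Chars.findFrom s sub st ∧ PySem.Chars.findFrom s sub st ≤ (s.length : Int) := by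
  rw [PySem.Chars.findFrom] at h ⊢
  simp only at h ⊢
  set st' : Int := if st < 0 then (if st + s.length < 0 then 0 else st + s.length) else st with hst'
  have hst0 : 0 ≤ st' := by rw [hst']; split_ifs <;> omega
  split_ifs at h ⊢ with h1 h2
  · omega
  · exact absurd rfl h
  · have hr := PySem.Chars.neg_one_le_find (List.drop st'.toNat (List.take (s.length:Int).toNat s)) sub
    have hl := PySem.Chars.find_le_length (List.drop st'.toNat (List.take (s.length:Int).toNat s)) sub
    simp only [List.length_drop, List.length_take] at hl
    constructor <;> omega

theorem pv_findFrom_bounds (s sub : String) (st : Int) (h : PySem.Str.findFrom s sub st ≠ -1) :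
    0 ≤ PySem.Str.findFrom s sub st ∧ PySem.Str.findFrom s sub st ≤ (s.toList.length : Int) := by
  rw [PySem.Str.findFrom_eq] at h ⊢
  exact pv_findFrom_bounds_chars s.toList sub.toList st h

theorem pv_loop_eq (text : String) (es : List String) (idx : Int) (s : List Int) :
    es.foldl (fun (st : Int × List Int) i =>
      let pos := PySem.Str.findFrom text i st.1
      if pos ≠ -1 then
        let tmp := PySem.Str.slice text none (some pos)
        let wsb : Int := (PySem.Str.len tmp : Int) - (PySem.Str.len (PySem.Str.replace tmp " " "") : Int)
        (pos + (PySem.Str.len i : Int), st.2 ++ [pos - wsb])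
      else
        (st.1, st.2 ++ [-1])) (idx, s)
    = es.foldl (fun (st : Int × List Int) e =>
      let pos := PySem.Str.findFrom text e st.1
      if pos = -1 then
        (st.1, st.2 ++ [-1])
      else
        (pos + (PySem.Str.len e : Int), st.2 ++ [PySem.List.pyGetD
          ((text.toList.foldl (fun (st : Int × List Int) c =>
            let run := st.1 + (if c = ' ' then 0 else 1)
            (run, st.2 ++ [run])) ((0 : Int), [(0 : Int)])).2) pos 0])) (idx, s) := by
  induction es generalizing idx s with
  | nil => rfl
  | cons e t ih =>
    simp only [List.foldl_cons]
    by_cases hp : PySem.Str.findFrom text e idx = -1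
    · simp only [hp, ne_eq, not_true_eq_false, if_false, if_true]
      exact ih _ _
    · have hb := pv_findFrom_bounds text e idx hp
      have hv := pv_val_eq text (PySem.Str.findFrom text e idx) hb.1 hb.2
      simp only [hp, ne_eq, not_false_eq_true, if_true, if_false, hv]
      exact ih _ _

-- ===== VERDICT (by name: the statement is the Claim_ definition above) =====
theorem find_starts_spec : Claim_equal_find_starts := by
  intro text entities _
  unfold Spec_find_starts find_starts find_starts_alt
  rw [pv_loop_eq]
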